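-- pv_equiv track=rewrite | github.com/ldct/cp | atcoder/abc230/E/E.py | ans
-- ===== SOURCE A (Python) =====
-- import math
--
-- def ans(N):
--     prefix = []
--     i = 1
--     for _ in range(math.ceil(math.sqrt(N))):
--         prefix += [N // i]
--         i += 1
--     d = dict()
--     for k in prefix:
--         d[k] = 1
--
--     for i in range(len(prefix)-1):
--         d[i+1] = prefix[i] - prefix[i+1]
--
--     ret = 0
--     for k in d:
--         ret += k*d[k]
--     return ret
-- ===== SOURCE B (Python) =====
-- import math
--
-- def ans(N):
--     s = math.isqrt(N)
--     return 2 * sum(N // i for i in range(1, s + 1)) - s * s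
-- ===== Notes on version B (the rewrite author's own statement) =====
-- stated objective: simpler
-- what changed: Replaced A's quotient-block bookkeeping (prefix list of floor-quotients, a dict overwritten to hold block counts, then a key-weighted sum) with the Dirichlet hyperbola closed form: twice the sum of N//i for i up to isqrt(N), minus the square of isqrt(N) — one plain loop, no list and no dict.
import Mathlib
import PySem

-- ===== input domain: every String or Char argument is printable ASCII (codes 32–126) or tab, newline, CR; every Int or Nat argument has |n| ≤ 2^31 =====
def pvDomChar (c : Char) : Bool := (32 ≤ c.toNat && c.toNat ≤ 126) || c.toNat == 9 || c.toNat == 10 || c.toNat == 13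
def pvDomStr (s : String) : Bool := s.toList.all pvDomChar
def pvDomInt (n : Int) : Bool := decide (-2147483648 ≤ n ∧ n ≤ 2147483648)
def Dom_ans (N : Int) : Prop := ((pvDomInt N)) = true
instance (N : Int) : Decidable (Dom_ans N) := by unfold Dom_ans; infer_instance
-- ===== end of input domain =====

-- B replaces A's quotient-block dictionary with the Dirichlet hyperbola closed form
-- 2*sum_{i=1..isqrt(N)} N//i - isqrt(N)^2: same value, one plain loop, no list and no dict.

-- ===== PORT A =====
-- math.ceil(math.sqrt(N)) for 0 ≤ N: on the domain |N| ≤ 2^31 the float sqrt is accurate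
-- enough that its ceiling is the exact ceiling square root, which this computes exactly.
def ceilSqrt (n : Nat) : Nat := if Nat.sqrt n * Nat.sqrt n = n then Nat.sqrt n else Nat.sqrt n + 1

def ans (N : Int) : Int :=
  -- prefix = []; i = 1; for _ in range(math.ceil(math.sqrt(N))): prefix += [N // i]; i += 1
  let st := (PySem.List.pyRange 0 (ceilSqrt N.toNat : Nat) 1).foldl
      (fun (st : List Int × Int) _ => (st.1 ++ [PySem.Int.floordiv N st.2], st.2 + 1)) ([], 1)
  let prefixL := st.1
  -- d = dict(); for k in prefix: d[k] = 1
  let d1 := prefixL.foldl (fun (d : PySem.Dict Int Int) k => d.insert k 1) PySem.Dict.empty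
  -- for i in range(len(prefix)-1): d[i+1] = prefix[i] - prefix[i+1]
  let d2 := (PySem.List.pyRange 0 ((prefixL.length : Int) - 1) 1).foldl
      (fun (d : PySem.Dict Int Int) i =>
        d.insert (i + 1) (PySem.List.pyGetD prefixL i 0 - PySem.List.pyGetD prefixL (i + 1) 0)) d1
  -- ret = 0; for k in d: ret += k*d[k]
  d2.keys.foldl (fun ret k => ret + k * d2.getD k 0) 0

-- ===== PORT B =====
def ans_alt (N : Int) : Int :=
  -- s = math.isqrt(N)  (ValueError for N < 0, like A's math.sqrt: excluded by Pre_)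
  let s : Nat := Nat.sqrt N.toNat
  -- 2 * sum(N // i for i in range(1, s + 1)) - s * s
  2 * ((PySem.List.pyRange 1 ((s : Int) + 1) 1).map (fun i => PySem.Int.floordiv N i)).sum
    - (s : Int) * (s : Int)

-- ===== PRECONDITION & SPEC =====
-- Pre_ excludes N < 0, where A raises ValueError (math.sqrt of a negative number).
def Pre_ans (N : Int) : Prop := 0 ≤ N
instance (N : Int) : Decidable (Pre_ans N) := by unfold Pre_ans; infer_instance
def pvWitness_ans : Int := 10

def Spec_ans (N : Int) (out : Int) : Prop := out = ans_alt N
instance (N : Int) (out : Int) : Decidable (Spec_ans N out) := by unfold Spec_ans; infer_instance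

-- ===== CLAIM (what is proved, stated in full; the proofs are below) =====
def Claim_equal_ans : Prop := ∀ (N : Int), Dom_ans N → Pre_ans N → Spec_ans N (ans N)

-- ===== LEMMAS AND PROOFS =====


def pQ (n j : Nat) : Int := ((n / j : Nat) : Int)

def prefList (n m : Nat) : List Int := (List.range m).map (fun j => pQ n (j + 1))

lemma foldPrefix (N : Int) (l : List Int) (pr : List Int) (i : Int) :
    l.foldl (fun (st : List Int × Int) _ => (st.1 ++ [PySem.Int.floordiv N st.2], st.2 + 1)) (pr, i)
      = (pr ++ (List.range l.length).map (fun (j : Nat) => PySem.Int.floordiv N (i + (j : Int))), i + l.length) := by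
  induction l generalizing pr i with
  | nil => simp
  | cons a l ih =>
      simp only [List.foldl_cons, ih, List.length_cons]
      refine Prod.ext ?_ ?_
      · rw [List.range_succ_eq_map, List.map_cons, List.map_map]
        have h1 : PySem.Int.floordiv N (i + ((0 : Nat) : Int)) = PySem.Int.floordiv N i := by
          norm_num
        have h2 : ((fun j : Nat => PySem.Int.floordiv N (i + (j : Int))) ∘ Nat.succ)
            = fun j : Nat => PySem.Int.floordiv N (i + 1 + (j : Int)) := by
          funext j; simp only [Function.comp_apply]; push_cast; ring_nf
        rw [h1, h2, List.append_assoc, List.singleton_append]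
      · push_cast; ring

lemma mem_prefList (n m : Nat) (k : Int) :
    k ∈ prefList n m ↔ ∃ i, 1 ≤ i ∧ i ≤ m ∧ k = pQ n i := by
  simp only [prefList, List.mem_map, List.mem_range]
  constructor
  · rintro ⟨j, hj, rfl⟩; exact ⟨j + 1, by omega, by omega, rfl⟩
  · rintro ⟨i, h1, h2, rfl⟩; exact ⟨i - 1, by omega, by rw [Nat.sub_add_cancel h1]⟩

lemma getD_foldOnes (l : List Int) (d : PySem.Dict Int Int) (k : Int) :
    (l.foldl (fun d k => d.insert k 1) d).getD k 0 = if k ∈ l then 1 else d.getD k 0 := by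
  induction l generalizing d with
  | nil => simp
  | cons a l ih =>
      simp only [List.foldl_cons, ih, PySem.Dict.getD_insert, List.mem_cons]
      split_ifs with h1 h2 h3 <;> simp_all

lemma getD_foldSucc (v : Nat → Int) (t : Nat) (d : PySem.Dict Int Int) (k : Int) :
    ((List.range t).foldl (fun d j => d.insert ((j : Int) + 1) (v j)) d).getD k 0
      = if 1 ≤ k ∧ k ≤ (t : Int) then v (k.toNat - 1) else d.getD k 0 := by
  induction t with
  | zero => simp; intro h1 h2; omega
  | succ t ih =>
      rw [List.range_succ, List.foldl_append]
      simp only [List.foldl_cons, List.foldl_nil, PySem.Dict.getD_insert, ih]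
      split_ifs with h1 h2 h3 h4 h5 <;> push_cast at * <;> first | omega | (congr 1; omega)



lemma sqrt_bounds (n : Nat) : Nat.sqrt n * Nat.sqrt n ≤ n ∧ n < (Nat.sqrt n + 1) * (Nat.sqrt n + 1) := by
  constructor
  · have := Nat.sqrt_le' n; nlinarith [this]
  · have := Nat.lt_succ_sqrt' n; calc n < (Nat.sqrt n).succ ^ 2 := this
      _ = (Nat.sqrt n + 1) * (Nat.sqrt n + 1) := by rw [Nat.succ_eq_add_one]; ring

lemma ceilSqrt_le_sq (n : Nat) : n ≤ ceilSqrt n * ceilSqrt n := by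
  unfold ceilSqrt; split_ifs with h
  · omega
  · exact le_of_lt (sqrt_bounds n).2

lemma ceilSqrt_pos (n : Nat) (hn : 1 ≤ n) : 1 ≤ ceilSqrt n := by
  unfold ceilSqrt; split_ifs with h
  · have : 0 < Nat.sqrt n := Nat.sqrt_pos.mpr hn; omega
  · omega

lemma ceilSqrt_le (n : Nat) (hn : 1 ≤ n) : ceilSqrt n ≤ n := by
  unfold ceilSqrt; split_ifs with h
  · exact Nat.sqrt_le_self n
  · have hs := Nat.sqrt_le_self n
    rcases Nat.lt_or_ge (Nat.sqrt n) n with h2 | h2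
    · omega
    · -- sqrt n = n: then n*n ≤ n so n ≤ 1, and sqrt 1 = 1 square, contradiction
      have he : Nat.sqrt n = n := le_antisymm hs h2
      have := (sqrt_bounds n).1
      rw [he] at this
      have : n = 1 := by nlinarith
      subst this; simp at h

lemma q_pos (n i : Nat) (h1 : 1 ≤ i) (h2 : i ≤ n) : 1 ≤ n / i := by
  rw [Nat.le_div_iff_mul_le (by omega)]; omega

lemma q_ge_iff (n m i : Nat) (hm : 1 ≤ m) (hi : 1 ≤ i) : m ≤ n / i ↔ i ≤ n / m := by
  rw [Nat.le_div_iff_mul_le (by omega : 0 < i), Nat.le_div_iff_mul_le (by omega : 0 < m),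
    Nat.mul_comm]

lemma q_adj_eq (n i : Nat) (hi : 1 ≤ i) (h : n / i = n / (i + 1)) : n / i ≤ i := by
  have h1 : (n / (i + 1)) * (i + 1) ≤ n := Nat.div_mul_le_self n (i + 1)
  have h2 : n < (n / i + 1) * i := by
    rw [← Nat.div_lt_iff_lt_mul (by omega : 0 < i)]; omega
  rw [← h] at h1
  rw [Nat.mul_add, Nat.mul_one] at h1
  rw [Nat.add_mul, Nat.one_mul] at h2
  omega

lemma t_le_m (n m : Nat) (hm : 1 ≤ m) (h : n ≤ m * m) : n / m ≤ m := by
  calc n / m ≤ m * m / m := Nat.div_le_div_right h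
    _ = m := Nat.mul_div_cancel_left m (by omega)

lemma q_injOn (n m : Nat) (hm : 1 ≤ m) (hsq : n ≤ m * m) :
    Set.InjOn (fun j => n / j) (Finset.Icc 1 (n / m) : Finset Nat) := by
  have aux : ∀ i j : Nat, i ∈ Finset.Icc 1 (n / m) → j ∈ Finset.Icc 1 (n / m) →
      n / i = n / j → i < j → False := by
    intro i j hi hj hij hlt
    simp only [Finset.mem_Icc] at hi hj
    have hq1 : n / j ≤ n / (i + 1) := Nat.div_le_div_left (by omega) (by omega)
    have hq2 : n / (i + 1) ≤ n / i := Nat.div_le_div_left (by omega) (by omega)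
    have heq : n / i = n / (i + 1) := by omega
    have h3 : n / i ≤ i := q_adj_eq n i (by omega) heq
    have h4 : m ≤ n / i := (q_ge_iff n m i hm (by omega)).mpr hi.2
    have h5 : n / m ≤ m := t_le_m n m hm hsq
    omega
  intro i hi j hj hij
  rw [Finset.mem_coe] at hi hj
  rcases Nat.lt_trichotomy i j with h | h | h
  · exact (aux i j hi hj hij h).elim
  · exact h
  · exact (aux j i hj hi hij.symm h).elim

lemma telescope (p : Nat → Int) (M : Nat) :
    (∑ i ∈ Finset.Icc 1 M, ((i : Int) * (p i - p (i + 1))))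
      = (∑ i ∈ Finset.Icc 1 M, p i) - (M : Int) * p (M + 1) := by
  induction M with
  | zero => simp
  | succ M ih =>
      rw [Finset.sum_Icc_succ_top (by omega), Finset.sum_Icc_succ_top (by omega), ih]
      push_cast; ring

lemma sum_split (p : Nat → Int) (s : Nat) (hs : 1 ≤ s) :
    (∑ i ∈ Finset.Icc 1 s, p i) = (∑ i ∈ Finset.Icc 1 (s - 1), p i) + p s := by
  obtain ⟨k, rfl⟩ : ∃ k, s = k + 1 := ⟨s - 1, by omega⟩
  rw [Finset.sum_Icc_succ_top (by omega), Nat.add_sub_cancel]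

lemma final (n : Nat) (hn : 1 ≤ n) :
    (∑ j ∈ Finset.Icc 1 (n / ceilSqrt n), pQ n j) + (∑ i ∈ Finset.Icc 1 (ceilSqrt n - 1), pQ n i)
      - ((ceilSqrt n : Int) - 1) * pQ n (ceilSqrt n)
    = 2 * (∑ i ∈ Finset.Icc 1 (Nat.sqrt n), pQ n i) - (Nat.sqrt n : Int) * (Nat.sqrt n : Int) := by
  have hb := sqrt_bounds n
  set s := Nat.sqrt n with hs
  have hs1 : 1 ≤ s := Nat.sqrt_pos.mpr hn
  by_cases hsq : s * s = n
  · have hcs : ceilSqrt n = s := by unfold ceilSqrt; rw [← hs, if_pos hsq]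
    have hdiv : n / s = s := by rw [← hsq, Nat.mul_div_cancel_left s (by omega)]
    have hps : pQ n s = (s : Int) := by unfold pQ; rw [hdiv]
    rw [hcs, hdiv, sum_split (pQ n) s hs1, hps]
    ring
  · have hcs : ceilSqrt n = s + 1 := by unfold ceilSqrt; rw [← hs, if_neg hsq]
    have htle : n / (s + 1) ≤ s := by
      have h2 : n / (s + 1) < s + 1 := by
        rw [Nat.div_lt_iff_lt_mul (by omega)]; exact hb.2
      omega
    have htge : s - 1 ≤ n / (s + 1) := by
      rw [Nat.le_div_iff_mul_le (by omega)]
      obtain ⟨k, hk⟩ : ∃ k, s = k + 1 := ⟨s - 1, by omega⟩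
      rw [hk]; simp only [Nat.add_sub_cancel]
      have hb1 := hb.1; rw [hk] at hb1; nlinarith
    have hpm : pQ n (s + 1) = ((n / (s + 1) : Nat) : Int) := rfl
    rw [hcs, Nat.add_sub_cancel, hpm]
    by_cases hts : n / (s + 1) = s
    · rw [hts]; push_cast; ring
    · have hts' : n / (s + 1) = s - 1 := by omega
      have hnlt : n < s * (s + 1) := by
        have h2 : n / (s + 1) < s := by omega
        rwa [Nat.div_lt_iff_lt_mul (by omega)] at h2
      have hdivs : n / s = s := by
        have hge : s ≤ n / s := by
          rw [Nat.le_div_iff_mul_le (by omega)]; exact hb.1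
        have hlt : n / s < s + 1 := by
          rw [Nat.div_lt_iff_lt_mul (by omega)]; nlinarith
        omega
      have hps : pQ n s = (s : Int) := by unfold pQ; rw [hdivs]
      rw [hts', sum_split (pQ n) s hs1, hps]
      push_cast [Nat.cast_sub hs1]; ring

lemma sumEval (n m : Nat) (d2 : PySem.Dict Int Int)
    (hd2 : d2 = (List.range (m - 1)).foldl
        (fun (d : PySem.Dict Int Int) (j : Nat) => d.insert ((j : Int) + 1) (pQ n (j + 1) - pQ n (j + 2)))
        ((prefList n m).foldl (fun (d : PySem.Dict Int Int) k => d.insert k 1) PySem.Dict.empty))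
    (hm1 : 1 ≤ m) (hmn : m ≤ n) (hmsq : n ≤ m * m) :
    d2.keys.foldl (fun ret k => ret + k * d2.getD k 0) 0
      = (∑ j ∈ Finset.Icc 1 (n / m), pQ n j) + (∑ i ∈ Finset.Icc 1 (m - 1), pQ n i)
          - ((m : Int) - 1) * pQ n m := by
  -- keys of d2
  have hK : d2.keys = PySem.Set.update (PySem.Set.ofList (prefList n m))
      ((List.range (m - 1)).map (fun j : Nat => (j : Int) + 1)) := by
    rw [hd2]
    rw [PySem.Dict.keys_foldl_insert_key (List.range (m - 1)) (fun j : Nat => (j : Int) + 1)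
      (fun _ j => pQ n (j + 1) - pQ n (j + 2))]
    rw [PySem.Dict.keys_foldl_insert (prefList n m) (fun _ _ => (1 : Int)) PySem.Dict.empty]
    rw [PySem.Dict.keys_empty, PySem.Set.update_nil_left]
  have hnodup : d2.keys.Nodup := by
    rw [hd2]
    apply PySem.Dict.nodup_keys_foldl_insert_key
    apply PySem.Dict.nodup_keys_foldl_insert
    rw [PySem.Dict.keys_empty]; exact List.nodup_nil
  -- getD of d2
  have hG : ∀ k : Int, d2.getD k 0
      = if 1 ≤ k ∧ k ≤ ((m - 1 : Nat) : Int) then pQ n (k.toNat - 1 + 1) - pQ n (k.toNat - 1 + 2)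
        else if k ∈ prefList n m then 1 else 0 := by
    intro k
    rw [hd2, getD_foldSucc (fun j => pQ n (j + 1) - pQ n (j + 2)) (m - 1) _ k,
      getD_foldOnes, PySem.Dict.getD_empty]
  -- the sum
  rw [PySem.List.foldl_add, zero_add, ← List.sum_toFinset _ hnodup]
  have hKfin : d2.keys.toFinset
      = (((Finset.Icc 1 m).image (fun i => n / i) ∪ Finset.Icc 1 (m - 1)).image
          (fun i : Nat => (i : Int))) := by
    ext k
    simp only [hK, List.mem_toFinset, PySem.Set.mem_update, PySem.Set.mem_ofList, mem_prefList,
      List.mem_map, List.mem_range, Finset.mem_image, Finset.mem_union, Finset.mem_Icc]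
    constructor
    · rintro (⟨i, h1, h2, rfl⟩ | ⟨j, hj, rfl⟩)
      · exact ⟨n / i, Or.inl ⟨i, ⟨h1, h2⟩, rfl⟩, rfl⟩
      · exact ⟨j + 1, Or.inr ⟨by omega, by omega⟩, by push_cast; ring⟩
    · rintro ⟨i, ⟨j, ⟨hj1, hj2⟩, rfl⟩ | ⟨hi1, hi2⟩, rfl⟩
      · exact Or.inl ⟨j, hj1, hj2, rfl⟩
      · refine Or.inr ⟨i - 1, by omega, by push_cast [Nat.cast_sub hi1]; ring⟩
  rw [hKfin]
  rw [Finset.sum_image (fun i _ j _ h => Nat.cast_injective h)]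
  have hsub : Finset.Icc 1 (m - 1) ⊆ (Finset.Icc 1 m).image (fun i => n / i) ∪ Finset.Icc 1 (m - 1) :=
    Finset.subset_union_right
  rw [← Finset.sum_sdiff hsub]
  -- the R-part telescopes
  have hR : (∑ i ∈ Finset.Icc 1 (m - 1), ((i : Int) * d2.getD (i : Int) 0))
      = (∑ i ∈ Finset.Icc 1 (m - 1), pQ n i) - ((m : Int) - 1) * pQ n m := by
    rw [Finset.sum_congr rfl (fun i hi => ?_)]
    · -- after congr: telescope
      rw [telescope (pQ n) (m - 1)]
      have h1 : m - 1 + 1 = m := by omega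
      have h2 : ((m - 1 : Nat) : Int) = (m : Int) - 1 := by push_cast [Nat.cast_sub hm1]; ring
      rw [h1, h2]
    · simp only [Finset.mem_Icc] at hi
      rw [hG]
      rw [if_pos ⟨by exact_mod_cast hi.1, by exact_mod_cast hi.2⟩]
      have h3 : ((i : Int).toNat - 1 + 1) = i := by omega
      have h4 : ((i : Int).toNat - 1 + 2) = i + 1 := by omega
      rw [h3, h4]
  -- the rest is the large-quotient part
  have hMR : ((Finset.Icc 1 m).image (fun i => n / i) ∪ Finset.Icc 1 (m - 1)) \ Finset.Icc 1 (m - 1)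
      = (Finset.Icc 1 (n / m)).image (fun j => n / j) := by
    ext i
    simp only [Finset.mem_sdiff, Finset.mem_union, Finset.mem_image, Finset.mem_Icc]
    constructor
    · rintro ⟨⟨j, ⟨hj1, hj2⟩, rfl⟩ | ⟨hi1, hi2⟩, hnot⟩
      · refine ⟨j, ⟨hj1, ?_⟩, rfl⟩
        have hq1 : 1 ≤ n / j := q_pos n j hj1 (le_trans hj2 hmn)
        have hqm : m ≤ n / j := by
          by_contra hcon
          exact hnot ⟨hq1, by omega⟩
        exact (q_ge_iff n m j hm1 hj1).mp hqm
      · exact absurd ⟨hi1, hi2⟩ hnot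
    · rintro ⟨j, ⟨hj1, hj2⟩, rfl⟩
      have hqm : m ≤ n / j := (q_ge_iff n m j hm1 hj1).mpr hj2
      constructor
      · exact Or.inl ⟨j, ⟨hj1, le_trans hj2 (t_le_m n m hm1 hmsq)⟩, rfl⟩
      · rintro ⟨h1, h2⟩; omega
  have hM : (∑ i ∈ ((Finset.Icc 1 m).image (fun i => n / i) ∪ Finset.Icc 1 (m - 1)) \ Finset.Icc 1 (m - 1),
        ((i : Int) * d2.getD (i : Int) 0))
      = ∑ j ∈ Finset.Icc 1 (n / m), pQ n j := by
    rw [hMR]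
    have hstep : ∀ i ∈ (Finset.Icc 1 (n / m)).image (fun j => n / j),
        ((i : Int) * d2.getD (i : Int) 0) = (i : Int) := by
      intro i hi
      simp only [Finset.mem_image, Finset.mem_Icc] at hi
      obtain ⟨j, ⟨hj1, hj2⟩, rfl⟩ := hi
      have hqm : m ≤ n / j := (q_ge_iff n m j hm1 hj1).mpr hj2
      rw [hG, if_neg (by push_cast; omega), if_pos ?_]
      · ring
      · rw [mem_prefList]
        exact ⟨j, hj1, le_trans hj2 (t_le_m n m hm1 hmsq), rfl⟩
    rw [Finset.sum_congr rfl hstep, Finset.sum_image (q_injOn n m hm1 hmsq)]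
    exact Finset.sum_congr rfl (fun j _ => rfl)
  rw [hM, hR]
  ring

lemma ansEval (n : Nat) (hn : 1 ≤ n) :
    ans (n : Int) = (∑ j ∈ Finset.Icc 1 (n / ceilSqrt n), pQ n j)
      + (∑ i ∈ Finset.Icc 1 (ceilSqrt n - 1), pQ n i)
      - ((ceilSqrt n : Int) - 1) * pQ n (ceilSqrt n) := by
  have hm1 : 1 ≤ ceilSqrt n := ceilSqrt_pos n hn
  have hmn : ceilSqrt n ≤ n := ceilSqrt_le n hn
  have hmsq : n ≤ ceilSqrt n * ceilSqrt n := ceilSqrt_le_sq n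
  set m := ceilSqrt n with hm
  simp only [ans, Int.toNat_natCast]
  rw [PySem.List.pyRange_zero_nat m]
  rw [foldPrefix]
  simp only [List.length_map, List.length_range]
  have hpre : (List.range m).map (fun (j : Nat) => PySem.Int.floordiv (n : Int) (1 + (j : Int)))
      = prefList n m := by
    unfold prefList pQ
    apply List.map_congr_left
    intro j hj
    have h1 : (1 + (j : Int)) = ((j + 1 : Nat) : Int) := by push_cast; ring
    rw [h1, PySem.Int.floordiv_natCast]
  simp only [List.nil_append, hpre]
  have hlen : ((prefList n m).length : Int) - 1 = ((m - 1 : Nat) : Int) := by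
    simp only [prefList, List.length_map, List.length_range]; omega
  rw [hlen, PySem.List.pyRange_zero_nat (m - 1), List.foldl_map]
  have hbody : ∀ (d : PySem.Dict Int Int), ∀ j ∈ List.range (m - 1),
      d.insert ((j : Int) + 1)
        (PySem.List.pyGetD (prefList n m) (j : Int) 0 - PySem.List.pyGetD (prefList n m) ((j : Int) + 1) 0)
      = d.insert ((j : Int) + 1) (pQ n (j + 1) - pQ n (j + 2)) := by
    intro d j hj
    rw [List.mem_range] at hj
    have e1 : PySem.List.pyGetD (prefList n m) (j : Int) 0 = pQ n (j + 1) := by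
      rw [PySem.List.pyGetD_natCast]
      unfold prefList
      rw [PySem.List.getD_map_range _ m j _ (by omega)]
    have e2 : PySem.List.pyGetD (prefList n m) ((j : Int) + 1) 0 = pQ n (j + 2) := by
      have h1 : ((j : Int) + 1) = ((j + 1 : Nat) : Int) := by push_cast; ring
      rw [h1, PySem.List.pyGetD_natCast]
      unfold prefList
      rw [PySem.List.getD_map_range _ m (j + 1) _ (by omega)]
    rw [e1, e2]
  rw [PySem.List.foldl_congr_mem (List.range (m - 1)) _ _ _ hbody]
  exact sumEval n m _ rfl hm1 hmn hmsq

lemma altEval (n : Nat) :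
    ans_alt (n : Int) = 2 * (∑ i ∈ Finset.Icc 1 (Nat.sqrt n), pQ n i)
      - (Nat.sqrt n : Int) * (Nat.sqrt n : Int) := by
  simp only [ans_alt, Int.toNat_natCast]
  rw [PySem.List.pyRange_one, List.map_map]
  have h1 : (((Nat.sqrt n : Int) + 1) - 1).toNat = Nat.sqrt n := by omega
  rw [h1]
  have h2 : ((fun i => PySem.Int.floordiv (n : Int) i) ∘ (fun k : Nat => (1 : Int) + (k : Int)))
      = fun k : Nat => pQ n (k + 1) := by
    funext k
    simp only [Function.comp_apply]
    have : ((1 : Int) + (k : Int)) = ((k + 1 : Nat) : Int) := by push_cast; ring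
    rw [this, PySem.Int.floordiv_natCast]; rfl
  rw [h2]
  have h3 : ((List.range (Nat.sqrt n)).map (fun k : Nat => pQ n (k + 1))).sum
      = ∑ i ∈ Finset.range (Nat.sqrt n), pQ n (i + 1) := rfl
  rw [h3]
  have h4 : (∑ i ∈ Finset.Icc 1 (Nat.sqrt n), pQ n i)
      = ∑ i ∈ Finset.range (Nat.sqrt n), pQ n (i + 1) := by
    rw [← Finset.Ico_add_one_right_eq_Icc 1 (Nat.sqrt n), Finset.sum_Ico_eq_sum_range]
    simp only [Nat.add_sub_cancel]
    exact Finset.sum_congr rfl (fun i _ => by rw [Nat.add_comm 1 i])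
  rw [h4]


-- ===== VERDICT (by name: the statement is the Claim_ definition above) =====
theorem ans_spec : Claim_equal_ans := by
  intro N _ hpre
  unfold Spec_ans
  obtain ⟨n, rfl⟩ : ∃ n : Nat, N = (n : Int) := ⟨N.toNat, (Int.toNat_of_nonneg hpre).symm⟩
  rcases Nat.eq_zero_or_pos n with h | h
  · subst h; decide
  · rw [ansEval n h, altEval n, final n h]
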